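-- pv_equiv track=rewrite | github.com/bulbulator228/prigramirovanie | maxOlenKonskayaZalupa/vyz/день 13.py | task_6_58_single_loop
-- ===== SOURCE A (Python) =====
-- def task_6_58_single_loop(number):
--     s = str(number)
--     max_digit = '0'
--     count_max = 0
--     for ch in s:
--         if ch > max_digit:
--             max_digit = ch
--             count_max = 1
--         elif ch == max_digit:
--             count_max += 1
--     return count_max
-- ===== SOURCE B (Python) =====
-- def task_6_58_single_loop(number):
--     s = str(number)
--     m = max(s)
--     return s.count(m)
-- ===== Notes on version B (the rewrite author's own statement) =====
-- stated objective: idiomatic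
-- what changed: Replaces the single state-carrying loop (running max + running count with reset) by two library passes: max(s) then s.count(m); the '0' seed is unnecessary because str(int) always contains a digit.
import Mathlib
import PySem

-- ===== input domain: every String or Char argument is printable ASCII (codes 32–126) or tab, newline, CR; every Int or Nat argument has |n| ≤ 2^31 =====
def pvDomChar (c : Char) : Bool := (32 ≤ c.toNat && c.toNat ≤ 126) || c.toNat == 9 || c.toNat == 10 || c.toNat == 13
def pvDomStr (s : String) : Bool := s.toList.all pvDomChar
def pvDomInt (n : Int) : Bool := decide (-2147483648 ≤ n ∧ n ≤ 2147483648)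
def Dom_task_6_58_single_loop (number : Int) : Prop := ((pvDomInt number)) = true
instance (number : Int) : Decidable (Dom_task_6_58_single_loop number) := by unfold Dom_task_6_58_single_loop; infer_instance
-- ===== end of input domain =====

-- B replaces A's single state-carrying loop (running max + count with reset) by two library
-- passes — max(s) then s.count(m) — dropping the '0' seed, which is redundant for str(int).

-- ===== PORT A =====
-- the loop body of A: state (max_digit, count_max), one character at a time
def pvStepA (st : Char × Int) (ch : Char) : Char × Int :=
  if st.1 < ch then (ch, 1)
  else if ch = st.1 then (st.1, st.2 + 1)
  else st

def task_6_58_single_loop (number : Int) : Int :=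
  ((PySem.Int.toStr number).toList.foldl pvStepA ('0', (0 : Int))).2

-- ===== PORT B =====
def task_6_58_single_loop_alt (number : Int) : Int :=
  match PySem.List.max? (PySem.Int.toStr number).toList (fun c => c) with
  | none => 0            -- unreachable (str(int) is never empty); totality guard for Python's max on ""
  | some m => (PySem.List.count (PySem.Int.toStr number).toList m : Int)

-- ===== PRECONDITION & SPEC =====
def Spec_task_6_58_single_loop (number : Int) (out : Int) : Prop := out = task_6_58_single_loop_alt number
instance (number : Int) (out : Int) : Decidable (Spec_task_6_58_single_loop number out) := by unfold Spec_task_6_58_single_loop; infer_instance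

-- ===== CLAIM (what is proved, stated in full; the proofs are below) =====
def Claim_equal_task_6_58_single_loop : Prop := ∀ (number : Int), Dom_task_6_58_single_loop number → Spec_task_6_58_single_loop number (task_6_58_single_loop number)

-- ===== LEMMAS AND PROOFS =====

-- count over a cons, with a propositional if (avoids simp looping on Char BEq)
theorem pvCount_cons (ch m : Char) (t : List Char) :
    (ch :: t).count m = t.count m + (if ch = m then 1 else 0) := by
  rw [List.count_cons]; simp only [beq_iff_eq]

-- A's loop computes: the running max of the seed and the list, and the count of that max in
-- the list (plus the carried count when the seed itself stays maximal).
theorem pvStepA_foldl (l : List Char) : ∀ (m0 : Char) (c0 : Int),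
    l.foldl pvStepA (m0, c0) =
      (l.foldl max m0,
       (l.count (l.foldl max m0) : Int) + (if l.foldl max m0 = m0 then c0 else 0)) := by
  induction l with
  | nil => intro m0 c0; simp
  | cons ch t ih =>
    intro m0 c0
    have hmax : (ch :: t).foldl max m0 = t.foldl max (max m0 ch) := by simp
    rw [hmax, List.foldl_cons]
    by_cases h1 : m0 < ch
    · have hseed : max m0 ch = ch := max_eq_right h1.le
      have hM : ch ≤ t.foldl max ch := (PySem.List.le_foldl_max t ch).1
      have hne : t.foldl max ch ≠ m0 := fun h => absurd (h ▸ hM) (not_le.mpr h1)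
      rw [hseed, show pvStepA (m0, c0) ch = (ch, 1) from by simp [pvStepA, h1],
        ih ch 1, if_neg hne, pvCount_cons]
      by_cases h2 : ch = t.foldl max ch
      · rw [if_pos h2, if_pos h2.symm]; exact Prod.ext rfl (by push_cast; ring)
      · rw [if_neg h2, if_neg (fun h => h2 h.symm)]; exact Prod.ext rfl (by push_cast; ring)
    · by_cases h2 : ch = m0
      · subst h2
        have hseed : max ch ch = ch := max_self ch
        rw [hseed, show pvStepA (ch, c0) ch = (ch, c0 + 1) from by simp [pvStepA], ih ch (c0 + 1),
          pvCount_cons]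
        by_cases h3 : t.foldl max ch = ch
        · rw [if_pos h3, if_pos h3, if_pos h3.symm]; exact Prod.ext rfl (by push_cast; ring)
        · rw [if_neg h3, if_neg h3, if_neg (fun h => h3 h.symm)]
          exact Prod.ext rfl (by push_cast; ring)
      · have h3 : ch < m0 := lt_of_le_of_ne (not_lt.mp h1) h2
        have hseed : max m0 ch = m0 := max_eq_left h3.le
        have hM : m0 ≤ t.foldl max m0 := (PySem.List.le_foldl_max t m0).1
        have hne : ch ≠ t.foldl max m0 := ne_of_lt (lt_of_lt_of_le h3 hM)
        rw [hseed, show pvStepA (m0, c0) ch = (m0, c0) from by simp [pvStepA, h1, h2],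
          ih m0 c0, pvCount_cons, if_neg hne]
        exact Prod.ext rfl (by push_cast; ring)

-- every character of Nat.toDigits is a decimal digit, hence ≥ '0'
theorem pvDigit_ge (c : Char) (m : Nat) (h : c ∈ Nat.toDigits 10 m) : '0' ≤ c := by
  have := Nat.isDigit_of_mem_toDigits (by norm_num) (by norm_num) h
  simp [Char.isDigit] at this
  exact this.1

-- A's value on a digit-headed list equals the count of that list's maximum
theorem pvCore (d : Char) (t : List Char) (hd : '0' ≤ d) :
    ((d :: t).foldl pvStepA ('0', (0 : Int))).2
      = ((d :: t).count (t.foldl max d) : Int) := by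
  have hseed : max '0' d = d := max_eq_right hd
  have h1 : (d :: t).foldl max '0' = t.foldl max d := by simp [hseed]
  rw [pvStepA_foldl, h1]
  by_cases h2 : t.foldl max d = '0'
  · rw [if_pos h2]; ring
  · rw [if_neg h2]; ring

theorem pvToDigits_cons (m : Nat) : ∃ d t, Nat.toDigits 10 m = d :: t := by
  rcases h : Nat.toDigits 10 m with _ | ⟨d, t⟩
  · have hp := @Nat.length_toDigits_pos 10 m
    rw [h] at hp; simp at hp
  · exact ⟨d, t, rfl⟩

theorem task_6_58_single_loop_eq (number : Int) :
    task_6_58_single_loop number = task_6_58_single_loop_alt number := by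
  unfold task_6_58_single_loop task_6_58_single_loop_alt
  rw [PySem.Int.toList_toStr]
  unfold PySem.Int.toChars
  by_cases hn : number < 0
  · rw [if_pos hn]
    obtain ⟨d, t, ht⟩ := pvToDigits_cons number.natAbs
    have hd : '0' ≤ d := pvDigit_ge d _ (by rw [ht]; exact List.mem_cons_self)
    have hdash : '-' < '0' := by decide
    rw [ht]
    -- A side: the leading '-' leaves the loop state unchanged
    have hA : ('-' :: d :: t).foldl pvStepA ('0', (0 : Int))
        = (d :: t).foldl pvStepA ('0', 0) := by
      rw [List.foldl_cons, show pvStepA ('0', (0 : Int)) '-' = ('0', 0) from by decide]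
    -- B side: the maximum over '-' :: d :: t is the maximum over d :: t
    have hmaxB : (PySem.List.max? ('-' :: d :: t) (fun y => y)) = some (t.foldl max d) := by
      rw [PySem.List.max?_id_cons, List.foldl_cons,
        max_eq_right (le_of_lt (lt_of_lt_of_le hdash hd))]
    have hM : d ≤ t.foldl max d := (PySem.List.le_foldl_max t d).1
    have hne : ('-' : Char) ≠ t.foldl max d :=
      ne_of_lt (lt_of_lt_of_le hdash (le_trans hd hM))
    rw [hA, pvCore d t hd, hmaxB]
    simp only [PySem.List.count_eq, pvCount_cons, if_neg hne]
    push_cast; ring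
  · rw [if_neg hn]
    obtain ⟨d, t, ht⟩ := pvToDigits_cons number.toNat
    have hd : '0' ≤ d := pvDigit_ge d _ (by rw [ht]; exact List.mem_cons_self)
    rw [ht, pvCore d t hd, PySem.List.max?_id_cons]
    simp only [PySem.List.count_eq]

-- ===== VERDICT (by name: the statement is the Claim_ definition above) =====
theorem task_6_58_single_loop_spec : Claim_equal_task_6_58_single_loop := by
  intro number _
  exact task_6_58_single_loop_eq number
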